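-- pv_equiv track=rewrite | github.com/EmKalin/spd | spd_lab2/spd2.py | calculate
-- ===== SOURCE A (Python) =====
-- def calculate(tablica,n):
--     S=0
--     C=tablica[0][0]
--     T=max(C-tablica[0][2],0)
--     F=tablica[0][1]*T
--
--     for i in range (1,n):
--         S = C
--         C = S + tablica[i][0]
--         T = max(C - tablica[i][2],0)
--         K = T*tablica[i][1]
--         F = F + K
--
--     return F
-- ===== SOURCE B (Python) =====
-- def calculate(tablica, n):
--     # Two passes: materialise completion times as a prefix-sum array,
--     # then reduce the weighted tardiness terms over it.
--     C = []
--     total = 0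
--     for i in range(n):
--         total += tablica[i][0]
--         C.append(total)
--     return sum(tablica[i][1] * max(C[i] - tablica[i][2], 0) for i in range(n))
-- ===== Notes on version B (the rewrite author's own statement) =====
-- stated objective: alternative
-- what changed: B replaces A's single fused loop carrying running completion time and running total by two separate passes: it first materialises the completion times as an explicit prefix-sum array over range(n), then sums the weighted tardiness terms over that array in a second pass.
-- intended difference: When n <= 0 A still returns job 0's weighted tardiness (its code computes that term before checking the loop bound), which is nonzero exactly when the first row has nonzero weight and due date below processing time; B sums over range(n) and returns 0, the intended sum over zero jobs. — e.g. on calculate([[3, 2, 2]], 0): A returns 2, B returns 0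
import Mathlib
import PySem

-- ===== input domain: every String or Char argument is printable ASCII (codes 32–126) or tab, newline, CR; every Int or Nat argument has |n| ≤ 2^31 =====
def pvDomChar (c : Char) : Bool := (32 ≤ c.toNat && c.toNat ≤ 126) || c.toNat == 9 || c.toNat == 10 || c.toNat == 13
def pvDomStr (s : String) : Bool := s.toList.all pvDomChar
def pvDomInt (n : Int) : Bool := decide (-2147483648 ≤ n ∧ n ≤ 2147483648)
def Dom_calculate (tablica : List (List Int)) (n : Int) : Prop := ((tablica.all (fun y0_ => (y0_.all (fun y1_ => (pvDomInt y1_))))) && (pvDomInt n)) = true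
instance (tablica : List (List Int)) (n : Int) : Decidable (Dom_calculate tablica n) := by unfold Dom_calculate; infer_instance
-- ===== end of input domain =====

-- B rebuilds A's fused running loop as two passes — an explicit prefix-sum array of completion
-- times over range(n), then a separate reduction of the weighted tardiness terms (alternative
-- decomposition, same cost); for n ≤ 0 B sums zero jobs while A still returns job 0's term (see D_).

-- ===== PORT A =====
-- tablica[i][j]: exact wherever the index is in range (Python raises otherwise; Pre_ excludes that).
def pvCell (t : List (List Int)) (i j : Int) : Int :=
  PySem.List.pyGetD (PySem.List.pyGetD t i []) j 0

def calculate (tablica : List (List Int)) (n : Int) : Int :=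
  let C0 := pvCell tablica 0 0
  let T0 := max (C0 - pvCell tablica 0 2) 0
  let F0 := pvCell tablica 0 1 * T0
  let r := (PySem.List.pyRange 1 n 1).foldl
    (fun (CF : Int × Int) i =>
      let C := CF.1 + pvCell tablica i 0
      let T := max (C - pvCell tablica i 2) 0
      let K := T * pvCell tablica i 1
      (C, CF.2 + K)) (C0, F0)
  r.2

-- ===== PORT B =====
def calculate_alt (tablica : List (List Int)) (n : Int) : Int :=
  let p := (PySem.List.pyRange 0 n 1).foldl
    (fun (acc : Int × List Int) i =>
      let total := acc.1 + pvCell tablica i 0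
      (total, acc.2 ++ [total])) (0, [])
  let C := p.2
  (PySem.List.pyRange 0 n 1).foldl
    (fun s i =>
      s + pvCell tablica i 1 * max (PySem.List.pyGetD C i 0 - pvCell tablica i 2) 0) 0

-- ===== PRECONDITION & SPEC =====
-- Pre_: exactly the inputs where Python A returns normally: the table is nonempty, n does not
-- exceed its length, and every accessed row (rows 0..max(n,1)-1) has the three fields.
def Pre_calculate (tablica : List (List Int)) (n : Int) : Prop :=
  0 < tablica.length ∧ n ≤ (tablica.length : Int) ∧
    ∀ r ∈ tablica.take (max n 1).toNat, 3 ≤ r.length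
instance (tablica : List (List Int)) (n : Int) : Decidable (Pre_calculate tablica n) := by
  unfold Pre_calculate; infer_instance
def pvWitness_calculate : List (List Int) × Int := ([[3, 2, 2], [1, 1, 5]], 2)

-- When n ≤ 0 A still returns job 0's weighted tardiness (computed before the loop bound is
-- checked), nonzero exactly when the first row has nonzero weight and due date below processing
-- time; B sums over range(n) and returns 0, the intended sum over zero jobs.
def D_calculate (tablica : List (List Int)) (n : Int) : Prop :=
  n ≤ 0 ∧ 0 < tablica.length ∧ (tablica.headD []).getD 1 0 ≠ 0 ∧
    (tablica.headD []).getD 2 0 < (tablica.headD []).getD 0 0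
instance (tablica : List (List Int)) (n : Int) : Decidable (D_calculate tablica n) := by
  unfold D_calculate; infer_instance

def Spec_calculate (tablica : List (List Int)) (n : Int) (out : Int) : Prop := ¬ D_calculate tablica n → out = calculate_alt tablica n
instance (tablica : List (List Int)) (n : Int) (out : Int) : Decidable (Spec_calculate tablica n out) := by unfold Spec_calculate; infer_instance

def pvDiffWitness_calculate : List (List Int) × Int := ([[3, 2, 2]], 0)
def pvDiffWitnessOut_calculate : Int × Int := (2, 0)

-- ===== CLAIM (what is proved, stated in full; the proofs are below) =====
def Claim_unchanged_calculate : Prop := ∀ (tablica : List (List Int)) (n : Int), Dom_calculate tablica n → Pre_calculate tablica n → Spec_calculate tablica n (calculate tablica n)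
def Claim_changed_calculate : Prop := Dom_calculate (pvDiffWitness_calculate.1) (pvDiffWitness_calculate.2) ∧ Pre_calculate (pvDiffWitness_calculate.1) (pvDiffWitness_calculate.2) ∧ D_calculate (pvDiffWitness_calculate.1) (pvDiffWitness_calculate.2) ∧ calculate (pvDiffWitness_calculate.1) (pvDiffWitness_calculate.2) = pvDiffWitnessOut_calculate.1 ∧ calculate_alt (pvDiffWitness_calculate.1) (pvDiffWitness_calculate.2) = pvDiffWitnessOut_calculate.2 ∧ pvDiffWitnessOut_calculate.1 ≠ pvDiffWitnessOut_calculate.2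
def Claim_exact_calculate : Prop := ∀ (tablica : List (List Int)) (n : Int), Dom_calculate tablica n → Pre_calculate tablica n → D_calculate tablica n → calculate tablica n ≠ calculate_alt tablica n

-- ===== LEMMAS AND PROOFS =====

-- prefix sum of processing times of the first k jobs
def pvP (t : List (List Int)) : Nat → Int
  | 0 => 0
  | k+1 => pvP t k + pvCell t k 0

-- weighted tardiness total of the first k jobs
def pvTot (t : List (List Int)) : Nat → Int
  | 0 => 0
  | k+1 => pvTot t k + pvCell t k 1 * max (pvP t (k+1) - pvCell t k 2) 0

theorem pv_lemA (t : List (List Int)) (k : Nat) :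
    (PySem.List.pyRange 1 (1 + (k : Int)) 1).foldl
      (fun (CF : Int × Int) i =>
        (CF.1 + pvCell t i 0,
         CF.2 + max (CF.1 + pvCell t i 0 - pvCell t i 2) 0 * pvCell t i 1))
      (pvP t 1, pvTot t 1)
    = (pvP t (1 + k), pvTot t (1 + k)) := by
  induction k with
  | zero => simp [PySem.List.pyRange_one_eq_nil]
  | succ k ih =>
    have hc : (1 + ((k + 1 : Nat) : Int)) = (1 + (k : Int)) + 1 := by push_cast; ring
    rw [hc, PySem.List.pyRange_one_succ_right (by omega), List.foldl_append, ih]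
    simp only [List.foldl_cons, List.foldl_nil, pvP, pvTot, Prod.mk.injEq, Nat.add_eq]
    push_cast
    constructor <;> ring

theorem pv_calcA (t : List (List Int)) (n : Int) :
    calculate t n = pvTot t (max n 1).toNat := by
  unfold calculate
  have hP1 : pvP t 1 = pvCell t 0 0 := by simp [pvP]
  have hT1 : pvTot t 1 = pvCell t 0 1 * max (pvCell t 0 0 - pvCell t 0 2) 0 := by
    simp [pvTot, hP1]
  dsimp only
  by_cases h : 1 ≤ n
  · have hk : n = 1 + ((n - 1).toNat : Int) := by omega
    have hm : (max n 1).toNat = 1 + (n - 1).toNat := by omega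
    have := pv_lemA t (n - 1).toNat
    rw [hP1, hT1] at this
    rw [hm, hk, this]
    dsimp only
    congr 1
    omega
  · have hm : (max n 1).toNat = 1 := by omega
    rw [hm, PySem.List.pyRange_one_eq_nil (by omega)]
    simp [hT1]

theorem pv_lemC (t : List (List Int)) (k : Nat) :
    (PySem.List.pyRange 0 (k : Int) 1).foldl
      (fun (acc : Int × List Int) i =>
        (acc.1 + pvCell t i 0, acc.2 ++ [acc.1 + pvCell t i 0])) (0, [])
    = (pvP t k, (List.range k).map (fun j => pvP t (j + 1))) := by
  induction k with
  | zero => simp [PySem.List.pyRange_one_eq_nil, pvP]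
  | succ k ih =>
    have hc : ((k + 1 : Nat) : Int) = (k : Int) + 1 := by push_cast; ring
    rw [hc, PySem.List.pyRange_one_succ_right (by omega), List.foldl_append, ih]
    simp [List.range_succ, pvP]

theorem pv_lemS (t : List (List Int)) (m k : Nat) (hk : k ≤ m) (s : Int) :
    (PySem.List.pyRange 0 (k : Int) 1).foldl
      (fun s i =>
        s + pvCell t i 1 *
          max (PySem.List.pyGetD ((List.range m).map (fun j => pvP t (j + 1))) i 0 - pvCell t i 2) 0) s
    = s + pvTot t k := by
  induction k generalizing s with
  | zero => simp [PySem.List.pyRange_one_eq_nil, pvTot]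
  | succ k ih =>
    have hc : ((k + 1 : Nat) : Int) = (k : Int) + 1 := by push_cast; ring
    rw [hc, PySem.List.pyRange_one_succ_right (by omega), List.foldl_append,
      ih (by omega)]
    have hkm : k < m := by omega
    simp [PySem.List.pyGetD_natCast, List.getD, hkm, pvTot]
    ring

theorem pv_calcB (t : List (List Int)) (n : Int) :
    calculate_alt t n = pvTot t n.toNat := by
  unfold calculate_alt
  dsimp only
  have hn : PySem.List.pyRange 0 n 1 = PySem.List.pyRange 0 ((n.toNat : Nat) : Int) 1 := by
    by_cases h : 0 ≤ n
    · rw [Int.toNat_of_nonneg h]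
    · rw [PySem.List.pyRange_one_eq_nil (by omega), PySem.List.pyRange_one_eq_nil (by omega)]
  rw [hn, pv_lemC]
  dsimp only
  rw [pv_lemS t _ _ le_rfl 0]
  simp

theorem pv_A_of_nonpos (r : List Int) (rest : List (List Int)) (n : Int) (hn : n ≤ 0) :
    calculate (r :: rest) n
      = r.getD 1 0 * max (r.getD 0 0 - r.getD 2 0) 0 := by
  rw [pv_calcA]
  have hm : (max n 1).toNat = 1 := by omega
  rw [hm]
  show pvTot (r :: rest) 0 + _ = _
  simp [pvTot, pvP, pvCell, PySem.List.pyGetD_ofNat']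

theorem pv_B_of_nonpos (t : List (List Int)) (n : Int) (hn : n ≤ 0) :
    calculate_alt t n = 0 := by
  rw [pv_calcB]
  have : n.toNat = 0 := by omega
  rw [this]; rfl

-- ===== VERDICT (by name: the statement is the Claim_ definition above) =====
theorem calculate_spec : Claim_unchanged_calculate := by
  intro tablica n _ hpre hnd
  by_cases h : 1 ≤ n
  · rw [pv_calcA, pv_calcB]
    congr 1
    omega
  · obtain ⟨hlen, -, -⟩ := hpre
    obtain ⟨r, rest, rfl⟩ : ∃ r rest, tablica = r :: rest := by
      cases tablica with
      | nil => simp at hlen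
      | cons r rest => exact ⟨r, rest, rfl⟩
    rw [pv_A_of_nonpos r rest n (by omega), pv_B_of_nonpos _ n (by omega)]
    have h2 : r.getD 1 0 = 0 ∨ r.getD 0 0 ≤ r.getD 2 0 := by
      by_contra hc
      rw [not_or] at hc
      exact hnd ⟨by omega, by simp, by simpa using hc.1, by simpa using not_le.mp hc.2⟩
    rcases h2 with hw | hd
    · rw [hw]; ring
    · have hmx : max (r.getD 0 0 - r.getD 2 0) 0 = 0 := by omega
      rw [hmx]; ring

theorem calculate_changed : Claim_changed_calculate := by
  unfold Claim_changed_calculate; decide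

theorem calculate_tight : Claim_exact_calculate := by
  intro tablica n _ hpre hd
  obtain ⟨hn, hlen, hw, hdp⟩ := hd
  obtain ⟨r, rest, rfl⟩ : ∃ r rest, tablica = r :: rest := by
    cases tablica with
    | nil => simp at hlen
    | cons r rest => exact ⟨r, rest, rfl⟩
  simp only [List.headD_cons] at hw hdp
  rw [pv_A_of_nonpos r rest n hn, pv_B_of_nonpos _ n hn]
  have hmax : max (r.getD 0 0 - r.getD 2 0) 0 = r.getD 0 0 - r.getD 2 0 := by omega
  rw [hmax]
  exact mul_ne_zero hw (by omega)
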